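-- pv_equiv track=rewrite | github.com/pypi-data/pypi-mirror-158 | packages/BioTEMPy/BioTEMPy-2.0.0-py3-none-any.whl/TEMPy/script/loqfit.py | split_scores_by_chain
-- ===== SOURCE A (Python) =====
-- def split_scores_by_chain(loqfit_scores):
--     loqfit_by_chain = {}
--
--     for ((chain, res_no), score) in loqfit_scores.items():
--         try:
--             loqfit_by_chain[chain][res_no] = score
--         except KeyError:
--             loqfit_by_chain[chain] = {res_no: score}
--
--     return loqfit_by_chain
-- ===== SOURCE B (Python) =====
-- def split_scores_by_chain(loqfit_scores):
--     chains = list(dict.fromkeys(chain for (chain, _res_no) in loqfit_scores))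
--     return {
--         c: {res_no: score
--             for ((chain, res_no), score) in loqfit_scores.items()
--             if chain == c}
--         for c in chains
--     }
-- ===== Notes on version B (the rewrite author's own statement) =====
-- stated objective: alternative
-- what changed: Replaces the single try/except insertion pass building a nested dict with a two-phase decomposition: first an ordered dedup of the chain ids, then one dict comprehension per chain filtering the items.
import Mathlib
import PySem

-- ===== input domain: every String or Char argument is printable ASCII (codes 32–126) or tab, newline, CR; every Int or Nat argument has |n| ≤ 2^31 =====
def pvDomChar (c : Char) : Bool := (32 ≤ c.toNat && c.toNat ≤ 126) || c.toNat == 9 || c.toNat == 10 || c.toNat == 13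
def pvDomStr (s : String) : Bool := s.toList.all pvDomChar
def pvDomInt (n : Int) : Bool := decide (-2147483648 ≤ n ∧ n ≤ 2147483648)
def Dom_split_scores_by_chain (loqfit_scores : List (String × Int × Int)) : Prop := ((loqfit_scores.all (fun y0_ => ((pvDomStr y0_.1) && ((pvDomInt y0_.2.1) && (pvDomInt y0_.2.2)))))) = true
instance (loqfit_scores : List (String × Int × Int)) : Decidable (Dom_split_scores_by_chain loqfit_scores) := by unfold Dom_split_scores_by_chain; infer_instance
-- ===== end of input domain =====

-- B groups by a pre-deduplicated chain list with one filtering comprehension per chain instead of A's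
-- single try/except nested-dict insertion pass; objective: alternative decomposition (return value only).

-- ===== PORT A =====
-- the try/except insertion loop over the items of the input dict
def split_scores_by_chain (loqfit_scores : List (String × Int × Int)) : List (String × List (Int × Int)) :=
  let d : PySem.Dict String (PySem.Dict Int Int) :=
    loqfit_scores.foldl (fun d p =>
      match d.get? p.1 with
      | some inner => d.insert p.1 (inner.insert p.2.1 p.2.2)   -- loqfit_by_chain[chain][res_no] = score
      | none => d.insert p.1 (PySem.Dict.ofList [(p.2.1, p.2.2)]))  -- except KeyError: {res_no: score}
      PySem.Dict.empty
  d.items.map (fun q => (q.1, q.2.items))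

-- ===== PORT B =====
def split_scores_by_chain_alt (loqfit_scores : List (String × Int × Int)) : List (String × List (Int × Int)) :=
  let chains := PySem.List.dedup (loqfit_scores.map (fun p => p.1))   -- dict.fromkeys(...)
  chains.map (fun c =>
    (c, ((loqfit_scores.filter (fun p => p.1 == c)).foldl
          (fun d p => d.insert p.2.1 p.2.2) PySem.Dict.empty).items))

-- ===== PRECONDITION & SPEC =====
def Spec_split_scores_by_chain (loqfit_scores : List (String × Int × Int)) (out : List (String × List (Int × Int))) : Prop := out = split_scores_by_chain_alt loqfit_scores
instance (loqfit_scores : List (String × Int × Int)) (out : List (String × List (Int × Int))) : Decidable (Spec_split_scores_by_chain loqfit_scores out) := by unfold Spec_split_scores_by_chain; infer_instance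

-- ===== CLAIM (what is proved, stated in full; the proofs are below) =====
def Claim_equal_split_scores_by_chain : Prop := ∀ (loqfit_scores : List (String × Int × Int)), Dom_split_scores_by_chain loqfit_scores → Spec_split_scores_by_chain loqfit_scores (split_scores_by_chain loqfit_scores)

-- ===== LEMMAS AND PROOFS =====

-- A's try/except step is exactly dict.modify with default empty
theorem stepA_eq_modify (d : PySem.Dict String (PySem.Dict Int Int)) (p : String × Int × Int) :
    (match d.get? p.1 with
      | some inner => d.insert p.1 (inner.insert p.2.1 p.2.2)
      | none => d.insert p.1 (PySem.Dict.ofList [(p.2.1, p.2.2)]))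
    = d.modify p.1 PySem.Dict.empty (fun inner => inner.insert p.2.1 p.2.2) := by
  have hmod : d.modify p.1 PySem.Dict.empty (fun inner => inner.insert p.2.1 p.2.2)
      = d.insert p.1 ((d.getD p.1 PySem.Dict.empty).insert p.2.1 p.2.2) := rfl
  rw [hmod, PySem.Dict.getD_eq_get?_getD]
  cases h : d.get? p.1 with
  | none => simp only [h, Option.getD_none]; rfl
  | some inner => simp

-- the per-chain content of A's fold is B's filtered fold
theorem getD_foldA (xs : List (String × Int × Int)) (d : PySem.Dict String (PySem.Dict Int Int)) (c : String) :
    (xs.foldl (fun d p => d.modify p.1 PySem.Dict.empty (fun inner => inner.insert p.2.1 p.2.2)) d).getD c PySem.Dict.empty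
    = (xs.filter (fun p => p.1 == c)).foldl (fun inner p => inner.insert p.2.1 p.2.2) (d.getD c PySem.Dict.empty) := by
  induction xs generalizing d with
  | nil => rfl
  | cons p xs ih =>
    simp only [List.foldl_cons, List.filter_cons]
    by_cases h : p.1 = c
    · subst h
      simp [ih]
    · simp [beq_false_of_ne h, ih, PySem.Dict.getD_modify, Ne.symm h]

-- ===== VERDICT (by name: the statement is the Claim_ definition above) =====
theorem split_scores_by_chain_spec : Claim_equal_split_scores_by_chain := by
  intro xs _
  unfold Spec_split_scores_by_chain split_scores_by_chain split_scores_by_chain_alt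
  have hfold : xs.foldl (fun d p =>
      match d.get? p.1 with
      | some inner => d.insert p.1 (inner.insert p.2.1 p.2.2)
      | none => d.insert p.1 (PySem.Dict.ofList [(p.2.1, p.2.2)]))
      PySem.Dict.empty
      = xs.foldl (fun d p => d.modify p.1 PySem.Dict.empty (fun inner => inner.insert p.2.1 p.2.2)) PySem.Dict.empty :=
    congrArg (fun f => xs.foldl f PySem.Dict.empty)
      (funext fun d => funext fun p => stepA_eq_modify d p)
  simp only [hfold]
  set dA := xs.foldl (fun d p => d.modify p.1 PySem.Dict.empty (fun inner => inner.insert p.2.1 p.2.2)) PySem.Dict.empty with hdA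
  have hnodup : dA.keys.Nodup := by
    rw [hdA]
    exact PySem.Dict.nodup_keys_foldl_modify_key xs (fun p => p.1) PySem.Dict.empty
      (fun _ p => fun inner => inner.insert p.2.1 p.2.2) PySem.Dict.empty (by simp)
  have hkeys : dA.keys = PySem.List.dedup (xs.map (fun p => p.1)) := by
    rw [hdA]
    rw [PySem.Dict.keys_foldl_modify_key xs (fun p => p.1) PySem.Dict.empty
      (fun _ p => fun inner => inner.insert p.2.1 p.2.2) PySem.Dict.empty]
    simp only [PySem.Dict.keys_empty, PySem.Set.update_nil_left]
    rfl
  rw [PySem.Dict.items_eq_map_keys dA hnodup PySem.Dict.empty, List.map_map, hkeys]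
  apply List.map_congr_left
  intro c _
  simp only [Function.comp]
  rw [hdA, getD_foldA xs PySem.Dict.empty c]
  rfl
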